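-- pv_equiv track=rewrite | github.com/juhyeon3856/Algorithm | 프로그래머스/2/42586. 기능개발/기능개발.py | solution
-- ===== SOURCE A (Python) =====
-- def solution(progresses,speeds):
--     L = [(99-progresses[i])//speeds[i]+1 for i in range(len(speeds))]
--     A = [0]*(len(L)+1)
--     a = L[0]
--     n=0
--     for i in range(len(L)):
--         if L[i] <= a:
--             A[n] += 1
--         else:
--             a=L[i]
--             n+=1
--             A[n] += 1
--     return A[:A.index(0)]
-- ===== SOURCE B (Python) =====
-- def solution(progresses, speeds):
--     L = [(99 - p) // s + 1 for p, s in zip(progresses, speeds)]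
--
--     def batches(lst):
--         head = lst[0]
--         k = 1
--         while k < len(lst) and lst[k] <= head:
--             k += 1
--         rest = batches(lst[k:]) if k < len(lst) else []
--         return [k] + rest
--
--     return batches(L)
-- ===== Notes on version B (the rewrite author's own statement) =====
-- stated objective: alternative
-- what changed: A makes one pass over the day list with a running maximum and a cursor into a preallocated zero counter array, then trims the array at its first leftover zero via A.index(0); B instead recurses on batches: it counts the leading days that are <= the batch head, emits that count, and recurses on the remaining sublist, with no running maximum, counter array or trimming.
import Mathlib
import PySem

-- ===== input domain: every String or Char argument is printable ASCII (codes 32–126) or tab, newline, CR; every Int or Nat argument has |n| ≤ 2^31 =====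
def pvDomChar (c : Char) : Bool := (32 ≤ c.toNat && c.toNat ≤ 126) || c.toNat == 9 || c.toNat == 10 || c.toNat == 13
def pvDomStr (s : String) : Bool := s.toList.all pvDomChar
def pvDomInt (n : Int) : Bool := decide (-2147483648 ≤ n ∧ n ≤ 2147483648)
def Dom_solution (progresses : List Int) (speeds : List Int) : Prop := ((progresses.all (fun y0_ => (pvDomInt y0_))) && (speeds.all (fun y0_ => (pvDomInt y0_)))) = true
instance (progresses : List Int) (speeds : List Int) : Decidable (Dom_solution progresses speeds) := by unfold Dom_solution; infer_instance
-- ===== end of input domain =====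

-- B replaces A's single in-place counter-array pass by a recursive head-split: count the
-- leading days ≤ the batch head, emit that count, recurse on the remainder; alternative
-- decomposition, same cost.

-- ===== PORT A =====
def solution (progresses : List Int) (speeds : List Int) : List Int :=
  let L := (PySem.List.pyRange 0 (speeds.length : Int) 1).map
    (fun i => PySem.Int.floordiv (99 - PySem.List.pyGetD progresses i 0)
                (PySem.List.pyGetD speeds i 0) + 1)
  let st := (PySem.List.pyRange 0 (L.length : Int) 1).foldl
    (fun (st : List Int × Int × Int) i =>
      if PySem.List.pyGetD L i 0 ≤ st.2.1 then
        (PySem.List.pySetD st.1 st.2.2 (PySem.List.pyGetD st.1 st.2.2 0 + 1), st.2.1, st.2.2)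
      else
        (PySem.List.pySetD st.1 (st.2.2 + 1) (PySem.List.pyGetD st.1 (st.2.2 + 1) 0 + 1),
         PySem.List.pyGetD L i 0, st.2.2 + 1))
    (List.replicate (L.length + 1) 0, PySem.List.pyGetD L 0 0, 0)
  -- A[:A.index(0)]; index(0) raising ValueError is unreachable (one zero slot always remains)
  match PySem.List.index? st.1 (0 : Int) with
  | some j => PySem.List.slice st.1 none (some (j : Int))
  | none => st.1

-- ===== PORT B =====
-- the while loop 'k = 1; while k < len(lst) and lst[k] <= head: k += 1' together with the
-- slice 'lst[k:]': returns (k - 1, lst[k:]) over the tail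
def splitBatch (h : Int) : List Int → Nat × List Int
  | [] => (0, [])
  | x :: xs => if x ≤ h then
      let kr := splitBatch h xs
      (kr.1 + 1, kr.2)
    else (0, x :: xs)

theorem splitBatch_len (h : Int) : ∀ (l : List Int), (splitBatch h l).2.length ≤ l.length := by
  intro l
  induction l with
  | nil => simp [splitBatch]
  | cons x xs ih =>
    by_cases hx : x ≤ h
    · simp only [splitBatch, if_pos hx, List.length_cons]; omega
    · simp [splitBatch, if_neg hx]

-- 'batches(lst)': lst[0] raises IndexError on [], which Pre_ excludes (the [] branch is unreachable)
def batchesB : List Int → List Int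
  | [] => []
  | h :: t =>
    let kr := splitBatch h t
    ((kr.1 + 1 : Nat) : Int) :: batchesB kr.2
  termination_by l => l.length
  decreasing_by
    have := splitBatch_len h t
    simp only [List.length_cons]
    omega

def solution_alt (progresses : List Int) (speeds : List Int) : List Int :=
  let L := (progresses.zip speeds).map (fun ps => PySem.Int.floordiv (99 - ps.1) ps.2 + 1)
  batchesB L

-- ===== PRECONDITION & SPEC =====
-- Pre_ excludes exactly the inputs where A raises: empty speeds (L[0] IndexError), progresses
-- shorter than speeds (progresses[i] IndexError), or a zero speed (ZeroDivisionError).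
def Pre_solution (progresses : List Int) (speeds : List Int) : Prop :=
  speeds ≠ [] ∧ speeds.length ≤ progresses.length ∧ (0 : Int) ∉ speeds
instance (progresses : List Int) (speeds : List Int) : Decidable (Pre_solution progresses speeds) := by unfold Pre_solution; infer_instance
def pvWitness_solution : List Int × List Int := ([93, 30, 55], [1, 30, 5])

def Spec_solution (progresses : List Int) (speeds : List Int) (out : List Int) : Prop := out = solution_alt progresses speeds
instance (progresses : List Int) (speeds : List Int) (out : List Int) : Decidable (Spec_solution progresses speeds out) := by unfold Spec_solution; infer_instance

-- ===== CLAIM (what is proved, stated in full; the proofs are below) =====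
def Claim_equal_solution : Prop := ∀ (progresses : List Int) (speeds : List Int), Dom_solution progresses speeds → Pre_solution progresses speeds → Spec_solution progresses speeds (solution progresses speeds)

-- ===== LEMMAS AND PROOFS =====

-- the batch-size list A's loop computes: a = running max, c = size of the open batch
def goB (a c : Int) : List Int → List Int
  | [] => [c]
  | x :: xs => if x ≤ a then goB a (c + 1) xs else c :: goB x 1 xs

def stepA (st : List Int × Int × Int) (x : Int) : List Int × Int × Int :=
  if x ≤ st.2.1 then
    (PySem.List.pySetD st.1 st.2.2 (PySem.List.pyGetD st.1 st.2.2 0 + 1), st.2.1, st.2.2)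
  else
    (PySem.List.pySetD st.1 (st.2.2 + 1) (PySem.List.pyGetD st.1 (st.2.2 + 1) 0 + 1), x, st.2.2 + 1)

-- the tail of A after its list L is built, written with stepA (definitionally A's fold body)
def postA (l : List Int) : List Int :=
  let st := (PySem.List.pyRange 0 (l.length : Int) 1).foldl
    (fun st i => stepA st (PySem.List.pyGetD l i 0))
    (List.replicate (l.length + 1) 0, PySem.List.pyGetD l 0 0, 0)
  match PySem.List.index? st.1 (0 : Int) with
  | some j => PySem.List.slice st.1 none (some (j : Int))
  | none => st.1

theorem solution_eq_postA (ps ss : List Int) :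
    solution ps ss = postA ((PySem.List.pyRange 0 (ss.length : Int) 1).map
      (fun i => PySem.Int.floordiv (99 - PySem.List.pyGetD ps i 0)
                  (PySem.List.pyGetD ss i 0) + 1)) := rfl

theorem L_eq (ps ss : List Int) (h : ss.length ≤ ps.length) :
    (PySem.List.pyRange 0 (ss.length : Int) 1).map
      (fun i => PySem.Int.floordiv (99 - PySem.List.pyGetD ps i 0)
                  (PySem.List.pyGetD ss i 0) + 1)
      = (ps.zip ss).map (fun x => PySem.Int.floordiv (99 - x.1) x.2 + 1) := by
  apply List.ext_getElem
  · simp [PySem.List.length_pyRange_one, List.length_zip]; omega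
  · intro k h1 h2
    have hk : k < ss.length := by
      simpa [PySem.List.length_pyRange_one] using h1
    simp only [List.getElem_map, PySem.List.getElem_pyRange_one, zero_add,
      List.getElem_zip, PySem.List.pyGetD_natCast]
    rw [List.getD_eq_getElem ps 0 (by omega), List.getD_eq_getElem ss 0 hk]

theorem goB_pos : ∀ (xs : List Int) (a c : Int), 0 < c → ∀ y ∈ goB a c xs, 0 < y := by
  intro xs
  induction xs with
  | nil => intro a c hc y hy; simp [goB] at hy; omega
  | cons x xs ih =>
    intro a c hc y hy
    by_cases hx : x ≤ a
    · simp only [goB, if_pos hx] at hy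
      exact ih a (c + 1) (by omega) y hy
    · simp only [goB, if_neg hx, List.mem_cons] at hy
      rcases hy with rfl | hy
      · exact hc
      · exact ih x 1 one_pos y hy

theorem goB_len : ∀ (xs : List Int) (a c : Int), (goB a c xs).length ≤ xs.length + 1 := by
  intro xs
  induction xs with
  | nil => intro a c; simp [goB]
  | cons x xs ih =>
    intro a c
    by_cases hx : x ≤ a
    · simp only [goB, if_pos hx, List.length_cons]
      exact le_trans (ih a (c + 1)) (by omega)
    · simp only [goB, if_neg hx, List.length_cons]
      have := ih x 1
      omega

theorem getD_mid (C : List Int) (c d : Int) (r : List Int) :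
    PySem.List.pyGetD (C ++ c :: r) (C.length : Int) d = c := by
  simp [PySem.List.pyGetD_natCast, List.getD]

theorem setD_mid (C : List Int) (c v : Int) (r : List Int) :
    PySem.List.pySetD (C ++ c :: r) (C.length : Int) v = C ++ v :: r := by
  simp [PySem.List.pySetD_natCast]

theorem aLoop : ∀ (xs C : List Int) (c a : Int) (k : Nat), xs.length ≤ k →
    (xs.foldl stepA (C ++ c :: List.replicate k 0, a, (C.length : Int))).1
      = C ++ goB a c xs ++ List.replicate (k + 1 - (goB a c xs).length) 0 := by
  intro xs
  induction xs with
  | nil => intro C c a k _; simp [goB]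
  | cons x xs ih =>
    intro C c a k hk
    rw [List.foldl_cons]
    by_cases hx : x ≤ a
    · have hstep : stepA (C ++ c :: List.replicate k 0, a, (C.length : Int)) x
          = (C ++ (c + 1) :: List.replicate k 0, a, (C.length : Int)) := by
        simp [stepA, hx]
      rw [hstep, ih C (c + 1) a k (by simpa using Nat.le_of_succ_le hk)]
      have hg : goB a c (x :: xs) = goB a (c + 1) xs := by simp only [goB, if_pos hx]
      rw [hg]
    · obtain ⟨k', rfl⟩ : ∃ k', k = k' + 1 := ⟨k - 1, by have h := hk; simp [List.length_cons] at h; omega⟩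
      have e1 : C ++ c :: List.replicate (k' + 1) 0 = (C ++ [c]) ++ (0 : Int) :: List.replicate k' 0 := by
        simp [List.replicate_succ]
      have e2 : (C.length : Int) + 1 = ((C ++ [c]).length : Int) := by simp
      have hstep : stepA (C ++ c :: List.replicate (k' + 1) 0, a, (C.length : Int)) x
          = ((C ++ [c]) ++ 1 :: List.replicate k' 0, x, ((C ++ [c]).length : Int)) := by
        simp only [stepA, if_neg hx]
        rw [e1, e2, getD_mid, setD_mid]
        norm_num
      rw [hstep, ih (C ++ [c]) 1 x k' (by simpa using hk)]
      have hg : goB a c (x :: xs) = c :: goB x 1 xs := by simp only [goB, if_neg hx]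
      rw [hg]
      have hnat : k' + 1 + 1 - (c :: goB x 1 xs).length = k' + 1 - (goB x 1 xs).length := by
        simp [List.length_cons]
      rw [hnat]
      simp

theorem postA_eq (x : Int) (xs : List Int) : postA (x :: xs) = goB x 1 xs := by
  simp only [postA]
  rw [PySem.List.foldl_pyRange_zero_pyGetD' (x :: xs) 0 stepA
    (List.replicate ((x :: xs).length + 1) 0, PySem.List.pyGetD (x :: xs) 0 0, 0)]
  rw [PySem.List.pyGetD_zero_cons, List.foldl_cons]
  have hstep : stepA (List.replicate ((x :: xs).length + 1) 0, x, 0) x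
      = (([] : List Int) ++ (1 : Int) :: List.replicate (xs.length + 1) 0, x,
         (([] : List Int).length : Int)) := by
    simp [stepA, PySem.List.pySetD_of_nonneg, List.length_cons, List.replicate_succ]
  rw [hstep, aLoop xs [] 1 x (xs.length + 1) (by omega)]
  have hm : ∃ m, xs.length + 1 + 1 - (goB x 1 xs).length = m + 1 := by
    have := goB_len xs x 1; exact ⟨xs.length + 1 - (goB x 1 xs).length, by omega⟩
  obtain ⟨m, hm⟩ := hm
  rw [hm]
  have h0 : (0 : Int) ∉ goB x 1 xs := fun h => absurd (goB_pos xs x 1 one_pos 0 h) (by omega)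
  have hidx : PySem.List.index? ([] ++ goB x 1 xs ++ List.replicate (m + 1) (0 : Int)) 0
      = some (goB x 1 xs).length := by
    rw [List.nil_append, List.replicate_succ]
    exact (PySem.List.index?_eq_some_iff _ _ _).mpr ⟨goB x 1 xs, List.replicate m 0, rfl, rfl, h0⟩
  rw [hidx]
  show PySem.List.slice (goB x 1 xs ++ (0 : Int) :: List.replicate m 0) none
      (some ((goB x 1 xs).length : Int)) = goB x 1 xs
  rw [PySem.List.slice_to_natCast]
  simp

-- goB and the head-split recursion compute the same list
theorem goB_split : ∀ (xs : List Int) (h c : Int),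
    goB h c xs = (c + ((splitBatch h xs).1 : Int)) :: batchesB (splitBatch h xs).2 := by
  intro xs
  induction xs with
  | nil => intro h c; simp [goB, splitBatch, batchesB]
  | cons x xs ih =>
    intro h c
    by_cases hx : x ≤ h
    · simp only [goB, if_pos hx, splitBatch]
      rw [ih h (c + 1)]
      congr 1
      push_cast
      ring
    · simp only [goB, if_neg hx, splitBatch]
      rw [ih x 1, batchesB]
      simp only [Int.natCast_zero, add_zero]
      congr 2
      push_cast
      ring

theorem batchesB_eq_goB (x : Int) (xs : List Int) : batchesB (x :: xs) = goB x 1 xs := by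
  rw [batchesB, goB_split xs x 1]
  congr 1
  push_cast
  ring

-- ===== VERDICT (by name: the statement is the Claim_ definition above) =====
theorem solution_spec : Claim_equal_solution := by
  intro ps ss _ hpre
  obtain ⟨hne, hlen, -⟩ := hpre
  unfold Spec_solution solution_alt
  rw [solution_eq_postA, L_eq ps ss hlen]
  have hss : 0 < ss.length := List.length_pos_of_ne_nil hne
  have hlen' : 0 < ((ps.zip ss).map (fun x => PySem.Int.floordiv (99 - x.1) x.2 + 1)).length := by
    simp [List.length_zip]; omega
  cases hL : (ps.zip ss).map (fun x => PySem.Int.floordiv (99 - x.1) x.2 + 1) with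
  | nil => rw [hL] at hlen'; simp at hlen'
  | cons x t => rw [postA_eq, batchesB_eq_goB]
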